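-- pv_equiv track=rewrite | github.com/pkaramon/algorithms-and-data-structures-coursework | offline/zad2/zad2.py | solve
-- ===== SOURCE A (Python) =====
-- def solve(A):
--     n = len(A)
--     max_stack= [(0, n-1)]
--     min_stack = []
--
--     while len(max_stack) != 0:
--         p, r = max_stack.pop()
--         q = parition(A, p, r)
--         if q+1 <= r:
--             max_stack.append((q+1, r))
--         if p <= q:
--             min_stack.append((p, q))
--
--     day = 0
--     total_snow =0
--     while len(min_stack) != 0:
--         p,r = min_stack.pop()
--         quick_sort(A, p, r)
--         for i in range(r, p-1, -1):
--             if A[i] <= day: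
--                 return total_snow
--             total_snow += A[i] - day
--             day += 1
--     return total_snow
--
-- def quick_sort(A, p, r):
--     while p < r:
--         q = parition(A, p, r)
--         quick_sort(A, p, q-1)
--         p = q+1
--
-- def parition(A, p, r):
--     pivot = A[r]
--     i = p-1
--     for j in range(p, r):
--         if A[j] <= pivot:
--             i += 1
--             A[i], A[j] = A[j], A[i]
--     A[i+1], A[r] = A[r], A[i+1]
--     return i+1
-- ===== SOURCE B (Python) =====
-- def solve(A):
--     # Return value only: A is sorted fully ascending in place (original may
--     # leave A only partially sorted when it returns early).
--     A.sort()
--     n = len(A)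
--     # binary search for k = number of positions m where the m-th largest > m
--     lo, hi = 0, n
--     while lo < hi:
--         mid = (lo + hi) // 2
--         if A[n - 1 - mid] > mid:
--             lo = mid + 1
--         else:
--             hi = mid
--     k = lo
--     return sum(A[n - k:]) - k * (k - 1) // 2
-- ===== Notes on version B (the rewrite author's own statement) =====
-- stated objective: faster
-- what changed: Replaces the hand-written lazy quicksort stack machine and the day-by-day descending accumulation loop with a library sort, a binary search for the cutoff rank k, and the closed form sum(top k) - k*(k-1)//2; A's quicksort is quadratic on already-sorted input, B stays O(n log n).
import Mathlib
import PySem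

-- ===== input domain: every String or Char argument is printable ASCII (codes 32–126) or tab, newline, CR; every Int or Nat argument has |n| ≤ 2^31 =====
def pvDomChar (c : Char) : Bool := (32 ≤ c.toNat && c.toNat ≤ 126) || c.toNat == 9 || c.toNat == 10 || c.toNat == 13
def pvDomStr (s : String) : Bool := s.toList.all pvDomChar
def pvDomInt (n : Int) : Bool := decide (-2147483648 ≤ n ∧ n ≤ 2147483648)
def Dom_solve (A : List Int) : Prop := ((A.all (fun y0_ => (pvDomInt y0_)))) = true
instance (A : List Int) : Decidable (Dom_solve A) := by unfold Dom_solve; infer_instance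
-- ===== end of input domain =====

-- B replaces A's hand-written lazy quicksort stack machine + day-by-day descending scan by a
-- library sort, a binary search for the cutoff rank k and a closed form; return value only:
-- A sorts its argument in place (possibly only partially on early return), B sorts it fully.


-- ===== PORT A =====
-- in-place array access/update; indices stay in range on admitted inputs
def pvGetA (B : List Int) (i : Int) : Int := B.getD i.toNat 0
def pvSwapA (B : List Int) (i j : Int) : List Int :=
  let ai := pvGetA B i
  let aj := pvGetA B j
  (B.set i.toNat aj).set j.toNat ai

-- parition(A, p, r) (sic)
def parition (B : List Int) (p r : Int) : List Int × Int :=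
  let pivot := pvGetA B r
  let s := (PySem.List.pyRange p r 1).foldl
    (fun (s : List Int × Int) j =>
      if pvGetA s.1 j ≤ pivot then (pvSwapA s.1 (s.2 + 1) j, s.2 + 1) else s)
    (B, p - 1)
  (pvSwapA s.1 (s.2 + 1) r, s.2 + 1)


-- state bound of the partition loop, needed only for the termination proofs below
theorem parition_fold_snd_bounds (pivot : Int) : ∀ (l : List Int) (s : List Int × Int),
    s.2 ≤ (l.foldl (fun (s : List Int × Int) j =>
      if pvGetA s.1 j ≤ pivot then (pvSwapA s.1 (s.2 + 1) j, s.2 + 1) else s) s).2 ∧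
    (l.foldl (fun (s : List Int × Int) j =>
      if pvGetA s.1 j ≤ pivot then (pvSwapA s.1 (s.2 + 1) j, s.2 + 1) else s) s).2 ≤ s.2 + l.length := by
  intro l
  induction l with
  | nil => intro s; simp
  | cons x t ih =>
    intro s
    simp only [List.foldl_cons, List.length_cons]
    split
    · have := ih (pvSwapA s.1 (s.2 + 1) x, s.2 + 1)
      constructor <;> · simp at this ⊢; omega
    · have := ih s
      constructor <;> omega

-- bounds on the returned pivot index, needed for termination of the loops below
theorem parition_snd_ge (B : List Int) (p r : Int) : p ≤ (parition B p r).2 := by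
  have := (parition_fold_snd_bounds (pvGetA B r) (PySem.List.pyRange p r 1) (B, p - 1)).1
  simp only [parition]
  omega

theorem parition_snd_le (B : List Int) (p r : Int) (h : p ≤ r) : (parition B p r).2 ≤ r := by
  have := (parition_fold_snd_bounds (pvGetA B r) (PySem.List.pyRange p r 1) (B, p - 1)).2
  rw [PySem.List.length_pyRange_one] at this
  simp only [parition]
  omega

-- quick_sort(A, p, r): while p < r: q = parition; quick_sort(A, p, q-1); p = q+1
def quickSort (B : List Int) (p r : Int) : List Int :=
  if h : p < r then
    let pr := parition B p r
    quickSort (quickSort pr.1 p (pr.2 - 1)) (pr.2 + 1) r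
  else B
termination_by (r - p + 1).toNat
decreasing_by
  · have h1 := parition_snd_ge B p r
    have h2 := parition_snd_le B p r (le_of_lt h)
    omega
  · have h1 := parition_snd_ge B p r
    have h2 := parition_snd_le B p r (le_of_lt h)
    omega

def stackMeasure (st : List (Int × Int)) : Nat :=
  (st.map (fun pr => (pr.2 - pr.1 + 1).toNat + 1)).sum

-- first while loop: pops max_stack, partitions, pushes segments
def phase1 (B : List Int) (maxStack minStack : List (Int × Int)) :
    List Int × List (Int × Int) :=
  match maxStack with
  | [] => (B, minStack)
  | (p, r) :: rest =>
    let pr := parition B p r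
    phase1 pr.1 (if pr.2 + 1 ≤ r then (pr.2 + 1, r) :: rest else rest)
      (if p ≤ pr.2 then (p, pr.2) :: minStack else minStack)
termination_by stackMeasure maxStack
decreasing_by
  have h1 := parition_snd_ge B p r
  simp only [stackMeasure, List.map_cons, List.sum_cons]
  split
  · simp only [List.map_cons, List.sum_cons]; omega
  · omega

-- for i in range(r, p-1, -1): early return via .error
def scanSeg (B : List Int) (p i day total : Int) : Except Int (Int × Int) :=
  if h : p ≤ i then
    if pvGetA B i ≤ day then .error total
    else scanSeg B p (i - 1) (day + 1) (total + (pvGetA B i - day))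
  else .ok (day, total)
termination_by (i - p + 1).toNat
decreasing_by omega

-- second while loop: pops min_stack, quick_sorts the segment, scans it descending
def phase2 (B : List Int) (minStack : List (Int × Int)) (day total : Int) : Int :=
  match minStack with
  | [] => total
  | (p, r) :: rest =>
    let B1 := quickSort B p r
    match scanSeg B1 p r day total with
    | .error t => t
    | .ok dt => phase2 B1 rest dt.1 dt.2

def solve (A : List Int) : Int :=
  let res := phase1 A [(0, PySem.List.len A - 1)] []
  phase2 res.1 res.2 0 0

-- ===== PORT B =====
def pvGetB (S : List Int) (i : Int) : Int := S.getD i.toNat 0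

-- while lo < hi: mid = (lo+hi)//2; if A[n-1-mid] > mid: lo = mid+1 else hi = mid
def bsearchK (S : List Int) (n lo hi : Int) : Int :=
  if h : lo < hi then
    let mid := PySem.Int.floordiv (lo + hi) 2
    if mid < pvGetB S (n - 1 - mid) then bsearchK S n (mid + 1) hi
    else bsearchK S n lo mid
  else lo
termination_by (hi - lo).toNat
decreasing_by
  · have := PySem.Int.floordiv_two_mid_bounds (le_of_lt h)
    omega
  · rw [PySem.Int.floordiv_eq_ediv_of_pos (by omega)]
    omega

def solve_alt (A : List Int) : Int :=
  let S := PySem.List.sorted A (fun x => x)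
  let n := PySem.List.len S
  let k := bsearchK S n 0 n
  (PySem.List.slice S (some (n - k)) none).sum - PySem.Int.floordiv (k * (k - 1)) 2

-- ===== PRECONDITION & SPEC =====
-- Pre_ excludes only the empty list, on which A raises IndexError (parition reads A[-1]).
def Pre_solve (A : List Int) : Prop := A ≠ []
instance (A : List Int) : Decidable (Pre_solve A) := by unfold Pre_solve; infer_instance

def pvWitness_solve : List Int := [1]

def Spec_solve (A : List Int) (out : Int) : Prop := out = solve_alt A
instance (A : List Int) (out : Int) : Decidable (Spec_solve A out) := by unfold Spec_solve; infer_instance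

-- ===== CLAIM (what is proved, stated in full; the proofs are below) =====
def Claim_equal_solve : Prop := ∀ (A : List Int), Dom_solve A → Pre_solve A → Spec_solve A (solve A)

-- ===== LEMMAS AND PROOFS =====

def valZ (X : List Int) (j : Nat) : Int := X.getD j 0
def segZ (X : List Int) (p r : Int) : List Int := (X.drop p.toNat).take ((r+1).toNat - p.toNat)

theorem getElem?_segZ (X : List Int) (p r : Int) (m : Nat) :
    (segZ X p r)[m]? = if m < (r+1).toNat - p.toNat then X[p.toNat + m]? else none := by
  simp [segZ, List.getElem?_take, List.getElem?_drop]

theorem segZ_congr {X Y : List Int} {p r : Int}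
    (h : ∀ j : Nat, p ≤ (j:Int) → (j:Int) ≤ r → X[j]? = Y[j]?) (hp : 0 ≤ p) :
    segZ X p r = segZ Y p r := by
  apply List.ext_getElem?
  intro m
  rw [getElem?_segZ, getElem?_segZ]
  split
  · next hm =>
    apply h <;> omega
  · rfl

theorem length_segZ (X : List Int) (p r : Int) :
    (segZ X p r).length = min ((r+1).toNat - p.toNat) (X.length - p.toNat) := by
  simp [segZ]

theorem mem_segZ {X : List Int} {p r : Int} (hp : 0 ≤ p) (x : Int) :
    x ∈ segZ X p r ↔ ∃ j : Nat, p ≤ (j:Int) ∧ (j:Int) ≤ r ∧ X[j]? = some x := by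
  rw [List.mem_iff_getElem?]
  constructor
  · rintro ⟨m, hm⟩
    rw [getElem?_segZ] at hm
    split at hm
    · next h => exact ⟨p.toNat + m, by omega, by omega, hm⟩
    · simp at hm
  · rintro ⟨j, h1, h2, h3⟩
    refine ⟨j - p.toNat, ?_⟩
    rw [getElem?_segZ]
    have : p.toNat + (j - p.toNat) = j := by omega
    rw [if_pos (by omega), this]
    exact h3

theorem segZ_set {X : List Int} {p r : Int} {j : Nat} {v : Int}
    (hp : 0 ≤ p) (h1 : p ≤ (j:Int)) (h2 : (j:Int) ≤ r) :
    segZ (X.set j v) p r = (segZ X p r).set (j - p.toNat) v := by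
  apply List.ext_getElem?
  intro m
  rw [getElem?_segZ, List.getElem?_set, List.getElem?_set, getElem?_segZ, length_segZ]
  split_ifs <;> first | rfl | omega

theorem getD_segZ (X : List Int) (p r : Int) (m : Nat) (hm : m < (r+1).toNat - p.toNat)
    (hl : p.toNat + m < X.length) : (segZ X p r).getD m 0 = valZ X (p.toNat + m) := by
  rw [List.getD_eq_getElem?_getD, getElem?_segZ, if_pos hm, valZ, List.getD_eq_getElem?_getD]

theorem set_set_swap_perm : ∀ (l : List Int) (i j : Nat), i < l.length → j < l.length →
    ((l.set i (l.getD j 0)).set j (l.getD i 0)).Perm l := by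
  have sub : ∀ (t : List Int) (m : Nat) (v : Int), m < t.length →
      (t.getD m 0 :: t.set m v).Perm (v :: t) := by
    intro t
    induction t with
    | nil => intro m v h; simp at h
    | cons y t' ih =>
      intro m v h
      match m with
      | 0 => simpa using List.Perm.swap v y t'
      | Nat.succ k =>
        simp only [List.getD_cons_succ, List.set_cons_succ]
        exact (List.Perm.swap _ _ _).trans
          (((ih k v (by simpa using h)).cons y).trans (List.Perm.swap _ _ _))
  intro l
  induction l with
  | nil => intro i j hi; simp at hi
  | cons x t ih =>
    intro i j hi hj
    match i, j with
    | 0, 0 => simp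
    | 0, Nat.succ m =>
      simp only [List.getD_cons_succ, List.getD_cons_zero, List.set_cons_zero, List.set_cons_succ]
      exact sub t m x (by simpa using hj)
    | Nat.succ n, 0 =>
      simp only [List.getD_cons_succ, List.getD_cons_zero, List.set_cons_zero, List.set_cons_succ]
      exact sub t n x (by simpa using hi)
    | Nat.succ n, Nat.succ m =>
      simp only [List.getD_cons_succ, List.set_cons_succ]
      exact (ih n m (by simpa using hi) (by simpa using hj)).cons x

theorem valZ_congr {X Y : List Int} {j : Nat} (h : X[j]? = Y[j]?) : valZ X j = valZ Y j := by
  simp only [valZ, List.getD_eq_getElem?_getD, h]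

theorem valZ_set (X : List Int) (a : Nat) (v : Int) (j : Nat) :
    valZ (X.set a v) j = if a = j ∧ a < X.length then v else valZ X j := by
  simp only [valZ, List.getD_eq_getElem?_getD, List.getElem?_set]
  split_ifs <;> simp_all <;> omega

theorem getElem?_eq_some_valZ {X : List Int} {j : Nat} (h : j < X.length) :
    X[j]? = some (valZ X j) := by
  rw [List.getElem?_eq_getElem h, valZ, List.getD_eq_getElem?_getD, List.getElem?_eq_getElem h]
  rfl

theorem segZ_nil (X : List Int) (p : Int) : segZ X p (p - 1) = [] := by
  simp only [segZ]
  have : (p - 1 + 1).toNat - p.toNat = 0 := by omega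
  simp [this]

theorem segZ_single (X : List Int) (r : Int) (h0 : 0 ≤ r) (hr : r < X.length) :
    segZ X r r = [valZ X r.toNat] := by
  apply List.ext_getElem?
  intro m
  rw [getElem?_segZ]
  match m with
  | 0 =>
    rw [if_pos (by omega)]
    rw [Nat.add_zero, getElem?_eq_some_valZ (by omega)]
    rfl
  | Nat.succ k =>
    rw [if_neg (by omega)]
    simp

theorem segZ_split (X : List Int) (p m r : Int) (hp : 0 ≤ p) (h1 : p ≤ m) (h2 : m ≤ r + 1) :
    segZ X p r = segZ X p (m-1) ++ segZ X m r := by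
  simp only [segZ]
  rw [show ((r+1).toNat - p.toNat) = (m.toNat - p.toNat) + ((r+1).toNat - m.toNat) by omega,
    List.take_add, List.drop_drop]
  have hm : (m - 1 + 1).toNat = m.toNat := by omega
  have hd : p.toNat + (m.toNat - p.toNat) = m.toNat := by omega
  rw [hm, hd]

theorem segZ_snoc (X : List Int) (p r : Int) (hp : 0 ≤ p) (h1 : p ≤ r) (h2 : r < X.length) :
    segZ X p r = segZ X p (r-1) ++ [valZ X r.toNat] := by
  rw [segZ_split X p r r hp h1 (by omega), segZ_single X r (by omega) h2]

theorem segZ_swap_perm {X : List Int} {p r : Int} {a b : Nat}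
    (hp : 0 ≤ p) (ha1 : p ≤ (a:Int)) (ha2 : (a:Int) ≤ r) (hb1 : p ≤ (b:Int)) (hb2 : (b:Int) ≤ r)
    (hal : a < X.length) (hbl : b < X.length) :
    (segZ ((X.set a (valZ X b)).set b (valZ X a)) p r).Perm (segZ X p r) := by
  rw [segZ_set hp (by omega) (by omega), segZ_set hp (by omega) (by omega)]
  have hga : (segZ X p r).getD (a - p.toNat) 0 = valZ X a := by
    rw [getD_segZ X p r _ (by omega) (by omega)]
    congr 1
    omega
  have hgb : (segZ X p r).getD (b - p.toNat) 0 = valZ X b := by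
    rw [getD_segZ X p r _ (by omega) (by omega)]
    congr 1
    omega
  rw [← hga, ← hgb]
  apply set_set_swap_perm
  · rw [length_segZ]; omega
  · rw [length_segZ]; omega


-- loop invariant of the partition fold
def PInv (A0 : List Int) (pivot p c : Int) (s : List Int × Int) : Prop :=
  s.1.length = A0.length ∧
  (p - 1 ≤ s.2 ∧ s.2 < c) ∧
  (∀ j : Nat, ((j:Int) < p ∨ c ≤ (j:Int)) → s.1[j]? = A0[j]?) ∧
  (segZ s.1 p (c-1)).Perm (segZ A0 p (c-1)) ∧
  (∀ j : Nat, p ≤ (j:Int) → (j:Int) ≤ s.2 → valZ s.1 j ≤ pivot) ∧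
  (∀ j : Nat, s.2 < (j:Int) → (j:Int) < c → pivot < valZ s.1 j)

theorem pstep_inv (A0 : List Int) (pivot p c : Int) (hp : 0 ≤ p) (hc : p ≤ c)
    (hclen : c < (A0.length : Int)) (s : List Int × Int) (h : PInv A0 pivot p c s) :
    PInv A0 pivot p (c+1)
      (if pvGetA s.1 c ≤ pivot then (pvSwapA s.1 (s.2 + 1) c, s.2 + 1) else s) := by
  obtain ⟨B, i⟩ := s
  obtain ⟨hlen, hi, hout, hperm, hlo, hhi⟩ := h
  simp only at hlen hi hout hperm hlo hhi
  have hBlen : c < (B.length : Int) := by rw [hlen]; exact hclen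
  have hcN : c.toNat < B.length := by omega
  have haN : (i+1).toNat < B.length := by omega
  have hvc : valZ B c.toNat = valZ A0 c.toNat := valZ_congr (hout c.toNat (by omega))
  have hsnoc : segZ B p c = segZ B p (c-1) ++ [valZ B c.toNat] :=
    segZ_snoc B p c hp hc (by omega)
  have hsnocA : segZ A0 p c = segZ A0 p (c-1) ++ [valZ A0 c.toNat] :=
    segZ_snoc A0 p c hp hc (by omega)
  have hpermc : (segZ B p c).Perm (segZ A0 p c) := by
    rw [hsnoc, hsnocA, hvc]
    exact hperm.append_right _
  split
  · next htest =>
    have hx : valZ B c.toNat ≤ pivot := htest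
    have hval : ∀ j : Nat,
        valZ ((B.set (i+1).toNat (pvGetA B c)).set c.toNat (pvGetA B (i+1))) j
        = if c.toNat = j then valZ B (i+1).toNat
          else if (i+1).toNat = j then valZ B c.toNat else valZ B j := by
      intro j
      rw [valZ_set, valZ_set]
      simp only [List.length_set]
      split_ifs <;> first | rfl | omega
    refine ⟨?_, ?_, ?_, ?_, ?_, ?_⟩
    · simp [pvSwapA, hlen]
    · simp only; omega
    · intro j hj
      simp only [pvSwapA, List.getElem?_set]
      rw [if_neg (by omega), if_neg (by omega)]
      exact hout j (by omega)
    · simp only [pvSwapA, show c + 1 - 1 = c by ring]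
      refine List.Perm.trans ?_ hpermc
      have := segZ_swap_perm (X := B) (p := p) (r := c) (a := (i+1).toNat) (b := c.toNat)
        hp (by omega) (by omega) (by omega) (by omega) haN hcN
      simpa [pvGetA, valZ] using this
    · intro j hj1 hj2
      simp only [pvSwapA] at ⊢
      rw [hval j]
      split_ifs with h1 h2
      · -- j = c.toNat, so i+1 = c (since j ≤ i+1 ≤ c); value valZ B (i+1)
        have : (i+1).toNat = c.toNat := by omega
        rw [this]
        exact hx
      · exact hx
      · exact hlo j hj1 (by omega)
    · intro j hj1 hj2
      simp only [pvSwapA] at ⊢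
      rw [hval j]
      split_ifs with h1 h2
      · exact hhi (i+1).toNat (by omega) (by omega)
      · omega
      · exact hhi j (by omega) (by omega)
  · next htest =>
    have hx : pivot < valZ B c.toNat := not_le.mp htest
    refine ⟨hlen, by omega, ?_, ?_, hlo, ?_⟩
    · intro j hj
      exact hout j (by omega)
    · simp only [show c + 1 - 1 = c by ring]
      exact hpermc
    · intro j hj1 hj2
      by_cases hjc : j = c.toNat
      · subst hjc
        exact hx
      · exact hhi j hj1 (by omega)

theorem pfold_inv (A0 : List Int) (pivot p : Int) (hp : 0 ≤ p) :
    ∀ (n : Nat) (a b : Int) (s : List Int × Int), (b - a).toNat = n → a ≤ b → p ≤ a →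
    b ≤ (A0.length : Int) →
    PInv A0 pivot p a s →
    PInv A0 pivot p b ((PySem.List.pyRange a b 1).foldl
      (fun (s : List Int × Int) j =>
        if pvGetA s.1 j ≤ pivot then (pvSwapA s.1 (s.2 + 1) j, s.2 + 1) else s) s) := by
  intro n
  induction n with
  | zero =>
    intro a b s hn hab _ _ hinv
    have hba : b = a := by omega
    subst hba
    rw [PySem.List.pyRange_one_eq_nil (by omega)]
    exact hinv
  | succ k ih =>
    intro a b s hn hab hpa hblen hinv
    rw [PySem.List.pyRange_one_cons (by omega)]
    rw [List.foldl_cons]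
    exact ih (a+1) b _ (by omega) (by omega) (by omega) hblen
      (pstep_inv A0 pivot p a hp hpa (by omega) s hinv)

theorem parition_final (B : List Int) (p r : Int) (hp : 0 ≤ p) (hpr : p ≤ r)
    (hr : r < (B.length : Int)) (S : List Int × Int)
    (hinv : PInv B (pvGetA B r) p r S) :
    (pvSwapA S.1 (S.2 + 1) r).length = B.length ∧
    (∀ j : Nat, ((j:Int) < p ∨ r < (j:Int)) → (pvSwapA S.1 (S.2 + 1) r)[j]? = B[j]?) ∧
    (segZ (pvSwapA S.1 (S.2 + 1) r) p r).Perm (segZ B p r) ∧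
    (∀ j : Nat, p ≤ (j:Int) → (j:Int) ≤ S.2 + 1 →
      valZ (pvSwapA S.1 (S.2 + 1) r) j ≤ valZ (pvSwapA S.1 (S.2 + 1) r) (S.2+1).toNat) ∧
    (∀ j : Nat, S.2 + 1 < (j:Int) → (j:Int) ≤ r →
      valZ (pvSwapA S.1 (S.2 + 1) r) (S.2+1).toNat ≤ valZ (pvSwapA S.1 (S.2 + 1) r) j) := by
  obtain ⟨B1, i⟩ := S
  obtain ⟨hlen, hi, hout, hperm, hlo, hhi⟩ := hinv
  simp only at hlen hi hout hperm hlo hhi ⊢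
  have hrN : r.toNat < B1.length := by omega
  have haN : (i+1).toNat < B1.length := by omega
  have hpiv : valZ B1 r.toNat = pvGetA B r := by
    rw [valZ_congr (hout r.toNat (by omega))]
    rfl
  have hval : ∀ j : Nat, valZ (pvSwapA B1 (i+1) r) j
      = if r.toNat = j then valZ B1 (i+1).toNat
        else if (i+1).toNat = j then valZ B1 r.toNat else valZ B1 j := by
    intro j
    simp only [pvSwapA]
    rw [valZ_set, valZ_set]
    simp only [List.length_set]
    split_ifs <;> first | rfl | omega
  have hvq : valZ (pvSwapA B1 (i+1) r) (i+1).toNat = pvGetA B r := by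
    rw [hval]
    by_cases h1 : r.toNat = (i+1).toNat
    · rw [if_pos h1, ← h1]
      exact hpiv
    · rw [if_neg h1, if_pos rfl]
      exact hpiv
  have hBperm : (segZ B1 p r).Perm (segZ B p r) := by
    rw [segZ_snoc B1 p r hp hpr (by omega), segZ_snoc B p r hp hpr (by omega), hpiv,
      show pvGetA B r = valZ B r.toNat from rfl]
    exact hperm.append_right _
  refine ⟨?_, ?_, ?_, ?_, ?_⟩
  · simp [pvSwapA, hlen]
  · intro j hj
    simp only [pvSwapA, List.getElem?_set]
    rw [if_neg (by omega), if_neg (by omega)]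
    exact hout j (by omega)
  · have hs := segZ_swap_perm (X := B1) (p := p) (r := r) (a := (i+1).toNat) (b := r.toNat)
      hp (by omega) (by omega) (by omega) (by omega) haN hrN
    exact (by simpa [pvSwapA, pvGetA, valZ] using hs : (segZ (pvSwapA B1 (i+1) r) p r).Perm
      (segZ B1 p r)).trans hBperm
  · intro j hj1 hj2
    rw [hvq, hval]
    split_ifs with h1 h2
    · rw [show (i+1).toNat = r.toNat by omega, hpiv]
    · rw [hpiv]
    · exact hlo j hj1 (by omega)
  · intro j hj1 hj2
    rw [hvq, hval]
    split_ifs with h1 h2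
    · exact le_of_lt (hhi (i+1).toNat (by omega) (by omega))
    · omega
    · exact le_of_lt (hhi j (by omega) (by omega))

theorem parition_spec (B : List Int) (p r : Int) (hp : 0 ≤ p) (hpr : p ≤ r)
    (hr : r < (B.length : Int)) :
    (parition B p r).1.length = B.length ∧
    (∀ j : Nat, ((j:Int) < p ∨ r < (j:Int)) → (parition B p r).1[j]? = B[j]?) ∧
    (segZ (parition B p r).1 p r).Perm (segZ B p r) ∧
    (∀ j : Nat, p ≤ (j:Int) → (j:Int) ≤ (parition B p r).2 →
      valZ (parition B p r).1 j ≤ valZ (parition B p r).1 (parition B p r).2.toNat) ∧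
    (∀ j : Nat, (parition B p r).2 < (j:Int) → (j:Int) ≤ r →
      valZ (parition B p r).1 (parition B p r).2.toNat ≤ valZ (parition B p r).1 j) := by
  have hinit : PInv B (pvGetA B r) p p (B, p - 1) := by
    refine ⟨rfl, by simp only; omega, fun j _ => rfl,
      by simp [segZ_nil], ?_, ?_⟩
    · intro j hj1 hj2
      simp only at hj2
      omega
    · intro j hj1 hj2
      simp only at hj1 hj2
      omega
  have key := pfold_inv B (pvGetA B r) p hp (r - p).toNat p r (B, p - 1) rfl hpr le_rfl
    (by omega) hinit
  exact parition_final B p r hp hpr hr _ key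

-- full specification of quickSort on the window [p, r]
theorem quickSort_spec : ∀ (n : Nat) (B : List Int) (p r : Int), (r - p + 1).toNat ≤ n →
    0 ≤ p → r < (B.length : Int) →
    (quickSort B p r).length = B.length ∧
    (∀ j : Nat, ((j:Int) < p ∨ r < (j:Int)) → (quickSort B p r)[j]? = B[j]?) ∧
    (segZ (quickSort B p r) p r).Perm (segZ B p r) ∧
    (∀ j1 j2 : Nat, p ≤ (j1:Int) → j1 ≤ j2 → (j2:Int) ≤ r →
      valZ (quickSort B p r) j1 ≤ valZ (quickSort B p r) j2) := by
  intro n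
  induction n with
  | zero =>
    intro B p r hn hp hr
    have hpr : ¬ p < r := by omega
    rw [quickSort, dif_neg hpr]
    refine ⟨rfl, fun j _ => rfl, List.Perm.refl _, ?_⟩
    intro j1 j2 h1 h2 h3
    have : j1 = j2 := by omega
    subst this
    exact le_rfl
  | succ m ih =>
    intro B p r hn hp hr
    by_cases hpr : p < r
    case neg =>
      rw [quickSort, dif_neg hpr]
      refine ⟨rfl, fun j _ => rfl, List.Perm.refl _, ?_⟩
      intro j1 j2 h1 h2 h3
      have : j1 = j2 := by omega
      subst this
      exact le_rfl
    case pos =>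
      rw [quickSort, dif_pos hpr]
      obtain ⟨plen, pout, pperm, plo, phi⟩ := parition_spec B p r hp (le_of_lt hpr) hr
      have hq1 := parition_snd_ge B p r
      have hq2 := parition_snd_le B p r (le_of_lt hpr)
      set A1 := (parition B p r).1 with hA1
      set q := (parition B p r).2 with hq
      have hqN : q.toNat < A1.length := by omega
      obtain ⟨len2, out2, perm2, sort2⟩ :=
        ih A1 p (q - 1) (by omega) hp (by omega)
      set B2 := quickSort A1 p (q - 1) with hB2
      obtain ⟨len3, out3, perm3, sort3⟩ :=
        ih B2 (q + 1) r (by omega) (by omega) (by omega)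
      set B3 := quickSort B2 (q + 1) r with hB3
      -- value facts
      have hvq3 : valZ B3 q.toNat = valZ A1 q.toNat := by
        rw [valZ_congr (out3 q.toNat (by omega)), valZ_congr (out2 q.toNat (by omega))]
      have hL3 : ∀ j : Nat, (j:Int) < q + 1 → valZ B3 j = valZ B2 j := by
        intro j hj
        exact valZ_congr (out3 j (by omega))
      -- cross facts
      have hLle : ∀ j : Nat, p ≤ (j:Int) → (j:Int) ≤ q - 1 → valZ B2 j ≤ valZ A1 q.toNat := by
        intro j hj1 hj2
        have hjlen : j < B2.length := by omega
        have hmem : valZ B2 j ∈ segZ B2 p (q-1) :=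
          (mem_segZ hp _).mpr ⟨j, hj1, hj2, getElem?_eq_some_valZ hjlen⟩
        have hmem2 : valZ B2 j ∈ segZ A1 p (q-1) := perm2.mem_iff.mp hmem
        obtain ⟨j', hj'1, hj'2, hj'3⟩ := (mem_segZ hp _).mp hmem2
        have : valZ A1 j' = valZ B2 j := by
          rw [valZ, List.getD_eq_getElem?_getD, hj'3]
          rfl
        rw [← this]
        exact plo j' hj'1 (by omega)
      have hRge : ∀ j : Nat, q + 1 ≤ (j:Int) → (j:Int) ≤ r → valZ A1 q.toNat ≤ valZ B3 j := by
        intro j hj1 hj2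
        have hjlen : j < B3.length := by omega
        have hmem : valZ B3 j ∈ segZ B3 (q+1) r :=
          (mem_segZ (by omega) _).mpr ⟨j, hj1, hj2, getElem?_eq_some_valZ hjlen⟩
        have hmem2 : valZ B3 j ∈ segZ B2 (q+1) r := perm3.mem_iff.mp hmem
        have hseg22 : segZ B2 (q+1) r = segZ A1 (q+1) r :=
          segZ_congr (fun j' h1 h2 => out2 j' (by omega)) (by omega)
        rw [hseg22] at hmem2
        obtain ⟨j', hj'1, hj'2, hj'3⟩ := (mem_segZ (by omega) _).mp hmem2
        have : valZ A1 j' = valZ B3 j := by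
          rw [valZ, List.getD_eq_getElem?_getD, hj'3]
          rfl
        rw [← this]
        exact phi j' (by omega) hj'2
      refine ⟨by omega, ?_, ?_, ?_⟩
      · intro j hj
        rw [out3 j (by omega), out2 j (by omega)]
        exact pout j hj
      · -- permutation
        have hsplit3 : segZ B3 p r = segZ B3 p (q-1) ++ (segZ B3 q q ++ segZ B3 (q+1) r) := by
          rw [segZ_split B3 p q r hp (by omega) (by omega),
            segZ_split B3 q (q+1) r (by omega) (by omega) (by omega)]
          simp [show q + 1 - 1 = q by ring]
        have hsplitA : segZ A1 p r = segZ A1 p (q-1) ++ (segZ A1 q q ++ segZ A1 (q+1) r) := by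
          rw [segZ_split A1 p q r hp (by omega) (by omega),
            segZ_split A1 q (q+1) r (by omega) (by omega) (by omega)]
          simp [show q + 1 - 1 = q by ring]
        have e1 : segZ B3 p (q-1) = segZ B2 p (q-1) :=
          segZ_congr (fun j h1 h2 => out3 j (by omega)) hp
        have e2 : segZ B3 q q = segZ A1 q q := by
          rw [segZ_single B3 q (by omega) (by omega), segZ_single A1 q (by omega) (by omega), hvq3]
        have e3 : segZ B2 (q+1) r = segZ A1 (q+1) r :=
          segZ_congr (fun j' h1 h2 => out2 j' (by omega)) (by omega)
        rw [hsplit3]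
        have step1 : (segZ B3 p (q-1) ++ (segZ B3 q q ++ segZ B3 (q+1) r)).Perm
            (segZ A1 p (q-1) ++ (segZ A1 q q ++ segZ A1 (q+1) r)) := by
          rw [e1, e2]
          exact List.Perm.append perm2 (List.Perm.append_left _ (by rw [← e3]; exact perm3))
        exact step1.trans (hsplitA ▸ pperm)
      · -- sortedness
        intro j1 j2 h1 h2 h3
        by_cases c1 : (j1:Int) ≤ q - 1
        · by_cases c2 : (j2:Int) ≤ q - 1
          · rw [hL3 j1 (by omega), hL3 j2 (by omega)]
            exact sort2 j1 j2 h1 h2 c2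
          · by_cases c3 : (j2:Int) = q
            · rw [hL3 j1 (by omega), show j2 = q.toNat by omega, hvq3]
              exact hLle j1 h1 (by omega)
            · refine le_trans ?_ (hRge j2 (by omega) h3)
              rw [hL3 j1 (by omega)]
              exact hLle j1 h1 (by omega)
        · by_cases c3 : (j1:Int) = q
          · by_cases c2 : (j2:Int) = q
            · rw [show j1 = j2 by omega]
            · rw [show j1 = q.toNat by omega, hvq3]
              exact hRge j2 (by omega) h3
          · exact sort3 j1 j2 (by omega) h2 h3


-- cross-segment ordering: everything in [p,q] ≤ everything in (q,r]
def CrossZ (B : List Int) (p q r : Int) : Prop :=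
  ∀ j1 j2 : Nat, p ≤ (j1:Int) → (j1:Int) ≤ q → q < (j2:Int) → (j2:Int) ≤ r →
    valZ B j1 ≤ valZ B j2

-- the min-stack layout produced by phase1: head = rightmost segment, contiguous cover of [p,r]
def Good (B : List Int) : Int → Int → List (Int × Int) → Prop
  | _, _, [] => False
  | p, r, (p', r') :: rest =>
      r' = r ∧ p' ≤ r ∧
      (match rest with
       | [] => p' = p
       | _ :: _ => p ≤ p' - 1 ∧ Good B p (p' - 1) rest ∧ CrossZ B p (p' - 1) r)

theorem good_head_ge {B : List Int} {p r p' r' : Int} {rest : List (Int × Int)}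
    (h : Good B p r ((p', r') :: rest)) : p ≤ p' := by
  obtain ⟨h1, h2, h3⟩ := h
  match rest with
  | [] => omega
  | _ :: _ => obtain ⟨h4, _, _⟩ := h3; omega

theorem crossZ_congr {X Y : List Int} {p q r : Int}
    (h : ∀ j : Nat, (j:Int) ≤ r → X[j]? = Y[j]?) (hc : CrossZ Y p q r) : CrossZ X p q r := by
  intro j1 j2 h1 h2 h3 h4
  rw [valZ_congr (h j1 (by omega)), valZ_congr (h j2 (by omega))]
  exact hc j1 j2 h1 h2 h3 h4

theorem good_congr {X Y : List Int} : ∀ {p r : Int} {segs : List (Int × Int)},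
    (∀ j : Nat, (j:Int) ≤ r → X[j]? = Y[j]?) → Good Y p r segs → Good X p r segs := by
  intro p r segs
  induction segs generalizing p r with
  | nil => intro _ h; exact h.elim
  | cons a rest ih =>
    intro h hg
    obtain ⟨pa, ra⟩ := a
    obtain ⟨h1, h2, h3⟩ := hg
    refine ⟨h1, h2, ?_⟩
    match rest with
    | [] => exact h3
    | b :: t =>
      obtain ⟨h4, h5, h6⟩ := h3
      exact ⟨h4, ih (fun j hj => h j (by omega)) h5, crossZ_congr h h6⟩

theorem good_snoc {B : List Int} : ∀ {segs : List (Int × Int)} {p q r : Int},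
    Good B (q+1) r segs → p ≤ q → q < r → CrossZ B p q r →
    Good B p r (segs ++ [(p, q)]) := by
  intro segs
  induction segs with
  | nil => intro p q r h; exact h.elim
  | cons a rest ih =>
    intro p q r hg hpq hqr hcr
    obtain ⟨pa, ra⟩ := a
    obtain ⟨h1, h2, h3⟩ := hg
    match rest with
    | [] =>
      -- single segment (pa, r) with pa = q+1; new tail [(p,q)]
      refine ⟨h1, h2, ?_⟩
      have hpa : pa = q + 1 := h3
      refine ⟨by omega, ⟨by omega, by omega, by omega⟩, ?_⟩
      intro j1 j2 a1 a2 a3 a4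
      exact hcr j1 j2 a1 (by omega) (by omega) a4
    | b :: t =>
      obtain ⟨h4, h5, h6⟩ := h3
      refine ⟨h1, h2, ?_⟩
      have hrec : Good B p (pa - 1) ((b :: t) ++ [(p, q)]) := by
        apply ih h5 hpq (by omega)
        intro j1 j2 a1 a2 a3 a4
        exact hcr j1 j2 a1 a2 a3 (by omega)
      refine ⟨by omega, hrec, ?_⟩
      intro j1 j2 a1 a2 a3 a4
      by_cases hj : (j1:Int) ≤ q
      · exact hcr j1 j2 a1 hj (by omega) a4
      · exact h6 j1 j2 (by omega) a2 a3 a4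


theorem phase1_spec : ∀ (n : Nat) (B : List Int) (p r : Int) (ms : List (Int × Int)),
    (r - p).toNat ≤ n → 0 ≤ p → p ≤ r → r < (B.length : Int) →
    ∃ C segs, phase1 B [(p, r)] ms = (C, segs ++ ms) ∧
      C.length = B.length ∧
      (∀ j : Nat, ((j:Int) < p ∨ r < (j:Int)) → C[j]? = B[j]?) ∧
      (segZ C p r).Perm (segZ B p r) ∧
      Good C p r segs := by
  intro n
  induction n with
  | zero =>
    intro B p r ms hn hp hpr hr
    have hq1 := parition_snd_ge B p r
    have hq2 := parition_snd_le B p r hpr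
    obtain ⟨plen, pout, pperm, _, _⟩ := parition_spec B p r hp hpr hr
    have hrp : r = p := by omega
    subst hrp
    rw [phase1, if_neg (by omega), if_pos (by omega), phase1]
    exact ⟨(parition B r r).1, [(r, (parition B r r).2)], rfl, plen, pout, pperm,
      by exact ⟨by omega, by omega, by omega⟩⟩
  | succ m ih =>
    intro B p r ms hn hp hpr hr
    have hq1 := parition_snd_ge B p r
    have hq2 := parition_snd_le B p r hpr
    obtain ⟨plen, pout, pperm, plo, phi⟩ := parition_spec B p r hp hpr hr
    set A1 := (parition B p r).1 with hA1
    set q := (parition B p r).2 with hqdef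
    by_cases hqr : q + 1 ≤ r
    case neg =>
      rw [phase1, if_neg hqr, if_pos (by omega), phase1]
      refine ⟨A1, [(p, q)], rfl, plen, pout, pperm, ?_⟩
      exact ⟨by omega, by omega, by omega⟩
    case pos =>
      rw [phase1, if_pos hqr, if_pos (by omega)]
      obtain ⟨C, segs', heq, hlen, hout, hperm, hgood⟩ :=
        ih A1 (q+1) r ((p, q) :: ms) (by omega) (by omega) (by omega) (by omega)
      refine ⟨C, segs' ++ [(p, q)], by rw [heq]; simp, by omega, ?_, ?_, ?_⟩
      · intro j hj
        rw [hout j (by omega)]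
        exact pout j hj
      · -- permutation across the split at q+1
        have e1 : segZ C p q = segZ A1 p q :=
          segZ_congr (fun j h1 h2 => hout j (by omega)) hp
        have hsC : segZ C p r = segZ C p q ++ segZ C (q+1) r := by
          have := segZ_split C p (q+1) r hp (by omega) (by omega)
          rw [this, show q + 1 - 1 = q by ring]
        have hsA : segZ A1 p r = segZ A1 p q ++ segZ A1 (q+1) r := by
          have := segZ_split A1 p (q+1) r hp (by omega) (by omega)
          rw [this, show q + 1 - 1 = q by ring]
        rw [hsC]
        refine List.Perm.trans ?_ (hsA ▸ pperm)
        rw [e1]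
        exact List.Perm.append_left _ hperm
      · -- Good via snoc; cross ordering from the partition
        apply good_snoc hgood (by omega) (by omega)
        intro j1 j2 a1 a2 a3 a4
        have hv1 : valZ C j1 = valZ A1 j1 := valZ_congr (hout j1 (by omega))
        have hv2 : valZ C j2 ∈ segZ C (q+1) r := by
          refine (mem_segZ (by omega) _).mpr ⟨j2, by omega, a4, ?_⟩
          exact getElem?_eq_some_valZ (by omega)
        have hv2' : valZ C j2 ∈ segZ A1 (q+1) r := hperm.mem_iff.mp hv2
        obtain ⟨j', b1, b2, b3⟩ := (mem_segZ (by omega) _).mp hv2'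
        have hval' : valZ A1 j' = valZ C j2 := by
          rw [valZ, List.getD_eq_getElem?_getD, b3]
          rfl
        rw [hv1, ← hval']
        calc valZ A1 j1 ≤ valZ A1 q.toNat := plo j1 a1 (by omega)
          _ ≤ valZ A1 j' := phi j' (by omega) b2


def sortAsc (L : List Int) : List Int := PySem.List.sorted L (fun x => x)

def runE : Except Int (Int × Int) → Int
  | .error t => t
  | .ok dt => dt.2

-- pure version of the descending scan
def scanL : List Int → Int → Int → Except Int (Int × Int)
  | [], day, total => .ok (day, total)
  | v :: rest, day, total =>
      if v ≤ day then .error total else scanL rest (day + 1) (total + (v - day))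

theorem scanSeg_eq : ∀ (n : Nat) (B : List Int) (p i day total : Int),
    (i - p + 1).toNat ≤ n → 0 ≤ p → i < (B.length : Int) →
    scanSeg B p i day total = scanL (segZ B p i).reverse day total := by
  intro n
  induction n with
  | zero =>
    intro B p i day total hn hp hi
    rw [scanSeg, dif_neg (by omega)]
    have : segZ B p i = [] := by
      simp only [segZ]
      have : (i + 1).toNat - p.toNat = 0 := by omega
      simp [this]
    rw [this]
    rfl
  | succ m ih =>
    intro B p i day total hn hp hi
    by_cases hpi : p ≤ i
    case neg =>
      rw [scanSeg, dif_neg hpi]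
      have : segZ B p i = [] := by
        simp only [segZ]
        have : (i + 1).toNat - p.toNat = 0 := by omega
        simp [this]
      rw [this]
      rfl
    case pos =>
      rw [scanSeg, dif_pos hpi,
        segZ_snoc B p i hp hpi hi, List.reverse_append, List.reverse_singleton,
        List.singleton_append, scanL]
      have hget : pvGetA B i = valZ B i.toNat := rfl
      rw [hget]
      split
      · rfl
      · exact ih B p (i-1) (day+1) (total + (valZ B i.toNat - day)) (by omega) hp (by omega)

theorem scanL_append : ∀ (X Y : List Int) (day total : Int),
    scanL (X ++ Y) day total =
      match scanL X day total with
      | .error t => .error t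
      | .ok dt => scanL Y dt.1 dt.2 := by
  intro X
  induction X with
  | nil => intro Y day total; rfl
  | cons v rest ih =>
    intro Y day total
    simp only [List.cons_append, scanL]
    split
    · rfl
    · exact ih Y (day + 1) (total + (v - day))

theorem pairwise_segZ {X : List Int} {p r : Int} (hp : 0 ≤ p)
    (h : ∀ j1 j2 : Nat, p ≤ (j1:Int) → j1 ≤ j2 → (j2:Int) ≤ r → valZ X j1 ≤ valZ X j2) :
    (segZ X p r).Pairwise (· ≤ ·) := by
  rw [List.pairwise_iff_getElem]
  intro a b ha hb hab
  have la : (segZ X p r)[a] = valZ X (p.toNat + a) := by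
    have h1 : (segZ X p r)[a]? = some ((segZ X p r)[a]) := List.getElem?_eq_getElem ha
    rw [getElem?_segZ] at h1
    rw [length_segZ] at ha hb
    rw [if_pos (by omega)] at h1
    rw [valZ, List.getD_eq_getElem?_getD, h1]
    rfl
  have lb : (segZ X p r)[b] = valZ X (p.toNat + b) := by
    have h1 : (segZ X p r)[b]? = some ((segZ X p r)[b]) := List.getElem?_eq_getElem hb
    rw [getElem?_segZ] at h1
    rw [length_segZ] at ha hb
    rw [if_pos (by omega)] at h1
    rw [valZ, List.getD_eq_getElem?_getD, h1]
    rfl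
  rw [length_segZ] at ha hb
  rw [la, lb]
  exact h _ _ (by omega) (by omega) (by omega)

theorem sortAsc_pairwise (L : List Int) : (sortAsc L).Pairwise (· ≤ ·) := by
  have := PySem.List.sorted_pairwise L (fun x => x)
  simpa [sortAsc] using this

theorem sortAsc_perm (L : List Int) : (sortAsc L).Perm L :=
  PySem.List.sorted_perm L (fun x => x) false

theorem eq_sortAsc_of_perm_of_pairwise {M L : List Int} (hperm : M.Perm L)
    (hpair : M.Pairwise (· ≤ ·)) : M = sortAsc L :=
  List.eq_of_perm_of_sorted (fun a b _ _ h1 h2 => le_antisymm h1 h2) hpair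
    (sortAsc_pairwise L) (hperm.trans (sortAsc_perm L).symm)

theorem sortAsc_perm_congr {X Y : List Int} (h : X.Perm Y) : sortAsc X = sortAsc Y :=
  eq_sortAsc_of_perm_of_pairwise ((sortAsc_perm X).trans h) (sortAsc_pairwise X)

theorem sortAsc_append_of_le {X Y : List Int} (h : ∀ x ∈ X, ∀ y ∈ Y, x ≤ y) :
    sortAsc (X ++ Y) = sortAsc X ++ sortAsc Y := by
  refine (eq_sortAsc_of_perm_of_pairwise ?_ ?_).symm
  · exact List.Perm.append (sortAsc_perm X) (sortAsc_perm Y)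
  · rw [List.pairwise_append]
    refine ⟨sortAsc_pairwise X, sortAsc_pairwise Y, ?_⟩
    intro a ha b hb
    exact h a ((sortAsc_perm X).mem_iff.mp ha) b ((sortAsc_perm Y).mem_iff.mp hb)

theorem phase2_good : ∀ (segs : List (Int × Int)) (B : List Int) (p r day total : Int),
    Good B p r segs → 0 ≤ p → r < (B.length : Int) →
    phase2 B segs day total = runE (scanL (sortAsc (segZ B p r)).reverse day total) := by
  intro segs
  induction segs with
  | nil => intro B p r day total hg; exact hg.elim
  | cons a rest ih =>
    intro B p r day total hg hp hr
    obtain ⟨p', r'⟩ := a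
    have hp' := good_head_ge hg
    obtain ⟨hr', hpr', hrest⟩ := hg
    replace hr' := hr'.symm
    subst hr'
    obtain ⟨qlen, qout, qperm, qsort⟩ :=
      quickSort_spec (r - p' + 1).toNat B p' r le_rfl (by omega) hr
    set B1 := quickSort B p' r with hB1
    have hseg1 : segZ B1 p' r = sortAsc (segZ B p' r) := by
      apply eq_sortAsc_of_perm_of_pairwise qperm
      exact pairwise_segZ (by omega) qsort
    have hscan : scanSeg B1 p' r day total = scanL (sortAsc (segZ B p' r)).reverse day total := by
      rw [scanSeg_eq (r - p' + 1).toNat B1 p' r day total le_rfl (by omega) (by omega), hseg1]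
    rw [phase2]
    match rest, hrest with
    | [], hpp =>
      subst hpp
      rw [hscan]
      cases hs : scanL (sortAsc (segZ B p' r)).reverse day total with
      | error t => rfl
      | ok dt =>
        simp only
        rw [phase2]
        rfl
    | b :: t, ⟨hb1, hb2, hb3⟩ =>
      -- split [p,r] at p'; right part is the head segment
      have hsplit : segZ B p r = segZ B p (p'-1) ++ segZ B p' r := by
        exact segZ_split B p p' r hp (by omega) (by omega)
      have hcross : ∀ x ∈ segZ B p (p'-1), ∀ y ∈ segZ B p' r, x ≤ y := by
        intro x hx y hy
        obtain ⟨j1, c1, c2, c3⟩ := (mem_segZ hp _).mp hx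
        obtain ⟨j2, d1, d2, d3⟩ := (mem_segZ (by omega) _).mp hy
        have e1 : valZ B j1 = x := by rw [valZ, List.getD_eq_getElem?_getD, c3]; rfl
        have e2 : valZ B j2 = y := by rw [valZ, List.getD_eq_getElem?_getD, d3]; rfl
        rw [← e1, ← e2]
        exact hb3 j1 j2 c1 c2 (by omega) d2
      rw [hsplit, sortAsc_append_of_le hcross, List.reverse_append, scanL_append, hscan]
      -- IH for the tail on B1 (positions ≤ p'-1 unchanged)
      have hout' : ∀ j : Nat, (j:Int) ≤ p' - 1 → B1[j]? = B[j]? := by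
        intro j hj
        exact qout j (by omega)
      have hgood1 : Good B1 p (p'-1) (b :: t) := good_congr hout' hb2
      have hseg' : segZ B1 p (p'-1) = segZ B p (p'-1) := segZ_congr (fun j h1 h2 => hout' j h2) hp
      cases hs : scanL (sortAsc (segZ B p' r)).reverse day total with
      | error t' => rfl
      | ok dt =>
        simp only
        rw [ih B1 p (p'-1) dt.1 dt.2 hgood1 hp (by omega), hseg']


theorem segZ_full (X : List Int) : segZ X 0 ((X.length : Int) - 1) = X := by
  simp only [segZ]
  have h0 : (0:Int).toNat = 0 := rfl
  have h1 : ((X.length : Int) - 1 + 1).toNat = X.length := by omega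
  rw [h0, h1]
  simp [List.take_length]

-- A-side: solve computes the descending scan of the sorted input
theorem solve_eq_scan (A : List Int) (hA : A ≠ []) :
    solve A = runE (scanL (sortAsc A).reverse 0 0) := by
  have hlen : 0 < A.length := List.length_pos_iff.mpr hA
  obtain ⟨C, segs, heq, hlenC, hout, hperm, hgood⟩ :=
    phase1_spec ((A.length : Int) - 1 - 0).toNat A 0 ((A.length : Int) - 1) [] le_rfl
      le_rfl (by omega) (by omega)
  have hsolve : solve A = phase2 C segs 0 0 := by
    simp only [solve, PySem.List.len_eq, heq, List.append_nil]
  rw [hsolve, phase2_good segs C 0 ((A.length : Int) - 1) 0 0 hgood le_rfl (by omega)]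
  rw [segZ_full A] at hperm
  have hfull : segZ C 0 ((A.length : Int) - 1) = segZ C 0 ((C.length : Int) - 1) := by
    rw [hlenC]
  rw [show sortAsc (segZ C 0 ((A.length : Int) - 1)) = sortAsc A from sortAsc_perm_congr hperm]

-- ===== B-side -----
def kcnt : List Int → Int → Nat
  | [], _ => 0
  | v :: rest, day => if v ≤ day then 0 else kcnt rest (day + 1) + 1

def gauss : Nat → Int
  | 0 => 0
  | k+1 => gauss k + k

theorem kcnt_le (D : List Int) : ∀ day, kcnt D day ≤ D.length := by
  induction D with
  | nil => intro day; simp [kcnt]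
  | cons v rest ih =>
    intro day
    rw [kcnt]
    split
    · simp
    · simp only [List.length_cons]
      exact Nat.succ_le_succ (ih (day + 1))

theorem kcnt_lt_val (D : List Int) : ∀ (day : Int) (m : Nat), m < kcnt D day →
    day + m < valZ D m := by
  induction D with
  | nil => intro day m h; simp [kcnt] at h
  | cons v rest ih =>
    intro day m h
    rw [kcnt] at h
    split at h
    · omega
    · match m with
      | 0 => simpa [valZ] using (by omega : day < v)
      | Nat.succ k =>
        have := ih (day + 1) k (by omega)
        simp only [valZ, List.getD_cons_succ] at *
        omega

theorem kcnt_ge_val (D : List Int) (hD : D.Pairwise (fun a b => b ≤ a)) :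
    ∀ (day : Int) (m : Nat), kcnt D day ≤ m → m < D.length → valZ D m ≤ day + m := by
  induction D with
  | nil => intro day m _ h; simp at h
  | cons v rest ih =>
    intro day m hk hm
    obtain ⟨hv, hrest⟩ := List.pairwise_cons.mp hD
    rw [kcnt] at hk
    split at hk
    · next hvd =>
      match m with
      | 0 => simpa [valZ] using (by omega : v ≤ day + 0)
      | Nat.succ k =>
        have h9 := getElem?_eq_some_valZ (show k < rest.length by simpa using hm)
        have hmem : valZ rest k ∈ rest := List.mem_of_getElem? h9
        have hle := hv _ hmem
        simp only [valZ, List.getD_cons_succ] at *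
        omega
    · next hvd =>
      match m with
      | 0 => omega
      | Nat.succ k =>
        have := ih hrest (day + 1) k (by omega) (by simpa using hm)
        simp only [valZ, List.getD_cons_succ] at *
        omega

theorem scanL_run (D : List Int) : ∀ (day total : Int),
    runE (scanL D day total) =
      total + (D.take (kcnt D day)).sum - (kcnt D day) * day - gauss (kcnt D day) := by
  induction D with
  | nil => intro day total; simp [scanL, kcnt, runE, gauss]
  | cons v rest ih =>
    intro day total
    rw [scanL, kcnt]
    split
    · simp [runE, gauss]
    · rw [ih (day + 1) (total + (v - day))]
      rw [List.take_succ_cons, List.sum_cons, gauss]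
      push_cast
      ring

theorem valZ_reverse (l : List Int) (m : Nat) (hm : m < l.length) :
    valZ l.reverse m = valZ l (l.length - 1 - m) := by
  rw [valZ, valZ, List.getD_eq_getElem?_getD, List.getD_eq_getElem?_getD,
    List.getElem?_reverse hm]


theorem gauss_eq (k : Nat) : gauss k = PySem.Int.floordiv ((k:Int) * ((k:Int) - 1)) 2 := by
  induction k with
  | zero => rw [PySem.Int.floordiv_eq_ediv_of_pos (by omega)]; simp [gauss]
  | succ m ih =>
    rw [PySem.Int.floordiv_eq_ediv_of_pos (by omega)] at ih ⊢
    have hmul : ((m:Int)+1) * (((m:Int)+1) - 1) = (m:Int) * ((m:Int) - 1) + (m:Int) * 2 := by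
      ring
    push_cast
    rw [hmul, Int.add_mul_ediv_right _ _ (by omega : (2:Int) ≠ 0)]
    rw [gauss]
    omega

theorem bsearchK_eq (S : List Int) (hS : S.Pairwise (· ≤ ·)) :
    ∀ (n : Nat) (lo hi : Int), (hi - lo).toNat ≤ n → 0 ≤ lo →
    lo ≤ (kcnt S.reverse 0 : Int) → (kcnt S.reverse 0 : Int) ≤ hi → hi ≤ (S.length : Int) →
    bsearchK S (S.length : Int) lo hi = (kcnt S.reverse 0 : Int) := by
  have hD : S.reverse.Pairwise (fun a b => b ≤ a) := List.pairwise_reverse.mpr hS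
  intro n
  induction n with
  | zero =>
    intro lo hi hn h0 h1 h2 h3
    rw [bsearchK, dif_neg (by omega)]
    omega
  | succ m ih =>
    intro lo hi hn h0 h1 h2 h3
    by_cases hlh : lo < hi
    case neg =>
      rw [bsearchK, dif_neg hlh]
      omega
    case pos =>
      rw [bsearchK, dif_pos hlh]
      have hmid := PySem.Int.floordiv_two_mid_bounds (le_of_lt hlh)
      have hmidlt : PySem.Int.floordiv (lo + hi) 2 < hi := by
        rw [PySem.Int.floordiv_eq_ediv_of_pos (by omega)]
        omega
      set mid := PySem.Int.floordiv (lo + hi) 2 with hmiddef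
      have hmN : mid.toNat < S.length := by omega
      have hval : pvGetB S ((S.length : Int) - 1 - mid) = valZ S.reverse mid.toNat := by
        rw [valZ_reverse S mid.toNat hmN]
        show S.getD ((S.length : Int) - 1 - mid).toNat 0 = S.getD (S.length - 1 - mid.toNat) 0
        congr 1
        omega
      by_cases htest : mid < pvGetB S ((S.length : Int) - 1 - mid)
      case pos =>
        rw [if_pos htest]
        have hlt : mid < (kcnt S.reverse 0 : Int) := by
          by_contra hcon
          have := kcnt_ge_val S.reverse hD 0 mid.toNat (by omega) (by simpa using hmN)
          rw [hval] at htest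
          omega
        exact ih (mid + 1) hi (by omega) (by omega) (by omega) h2 h3
      case neg =>
        rw [if_neg htest]
        have hge : (kcnt S.reverse 0 : Int) ≤ mid := by
          by_contra hcon
          have := kcnt_lt_val S.reverse 0 mid.toNat (by omega)
          rw [hval] at htest
          omega
        exact ih lo mid (by omega) h0 h1 hge (by omega)

-- B-side: solve_alt computes the same descending scan, in closed form
theorem solve_alt_eq_scan (A : List Int) :
    solve_alt A = runE (scanL (sortAsc A).reverse 0 0) := by
  have hpair : (sortAsc A).Pairwise (· ≤ ·) := sortAsc_pairwise A
  set S := sortAsc A with hSdef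
  have hk0 : kcnt S.reverse 0 ≤ S.length := by
    have := kcnt_le S.reverse 0
    simpa using this
  have hb := bsearchK_eq S hpair (S.length : Int).toNat 0 (S.length : Int) (by omega) le_rfl
    (by omega) (by omega) le_rfl
  have hrun := scanL_run S.reverse 0 0
  set k0 := kcnt S.reverse 0 with hk0def
  have hsolve : solve_alt A =
      (PySem.List.slice S (some ((S.length : Int) - (k0 : Int))) none).sum -
        PySem.Int.floordiv ((k0 : Int) * ((k0 : Int) - 1)) 2 := by
    simp only [solve_alt, PySem.List.len_eq]
    rw [show (PySem.List.sorted A fun x => x) = S from rfl, hb]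
  rw [hsolve, PySem.List.slice_from S (by omega), hrun]
  have htake : S.reverse.take k0 = (S.drop (S.length - k0)).reverse := List.take_reverse
  have hsum : (S.drop (((S.length : Int) - (k0 : Int)).toNat)).sum = (S.reverse.take k0).sum := by
    rw [htake, List.sum_reverse]
    congr 2
    omega
  rw [hsum, ← gauss_eq]
  ring

-- ===== VERDICT (by name: the statement is the Claim_ definition above) =====
theorem solve_spec : Claim_equal_solve := by
  intro A _ hpre
  unfold Spec_solve
  rw [solve_eq_scan A hpre, solve_alt_eq_scan A]
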